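-- pv_equiv track=rewrite | github.com/tenstorrent/tt-inference-server | tt-inference-server-v2/report_module/markdown/report_renderers.py | build_check_columns
-- ===== SOURCE A (Python) =====
-- from typing import Any, Callable, Dict, List, Optional, Tuple
--
-- def build_check_columns(target_checks: Optional[Dict]) -> List[Tuple[str, str]]:
--     """Build display column definitions for target check metrics."""
--     if not target_checks:
--         return []
--
--     check_cols = [
--         (
--             f"{k}_{metric}",
--             " ".join(
--                 w.upper() if w.lower() == "ttft" else w.capitalize()
--                 for w in f"{k}_{metric}".split("_")
--             )
--             + (
--                 ""
--                 if metric.endswith("_check") or metric.endswith("_ratio")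
--                 else " (ms)"
--                 if metric.startswith("ttft")
--                 else " (TPS)"
--                 if metric.startswith("tput")
--                 else ""
--             ),
--         )
--         for k in target_checks
--         for metric in ("ttft_check", "tput_user_check", "ttft", "tput_user")
--     ]
--     check_cols.sort(key=lambda col: not col[0].endswith("_check"))
--     return check_cols
-- ===== SOURCE B (Python) =====
-- def _fmt(k):
--     """Display form of a key: underscore-split words, TTFT uppercased, others capitalized."""
--     return " ".join(
--         w.upper() if w.lower() == "ttft" else w.capitalize() for w in k.split("_")
--     )
--
-- # (metric name suffix, ready-made display suffix) — the metric part of every column is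
-- # one of four fixed strings, so its formatted form is a constant.
-- _CHECK_METRICS = (("ttft_check", " TTFT Check"), ("tput_user_check", " Tput User Check"))
-- _PLAIN_METRICS = (("ttft", " TTFT (ms)"), ("tput_user", " Tput User (TPS)"))
--
--
-- def build_check_columns(target_checks):
--     """Build display column definitions for target check metrics."""
--     if not target_checks:
--         return []
--     rows = [(k, _fmt(k)) for k in target_checks]
--     out = []
--     for metrics in (_CHECK_METRICS, _PLAIN_METRICS):
--         for k, f in rows:
--             for m, disp in metrics:
--                 out.append((f"{k}_{m}", f + disp))
--     return out
-- ===== Notes on version B (the rewrite author's own statement) =====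
-- stated objective: simpler
-- what changed: B drops the build-then-stable-sort and the per-metric suffix branching: it formats each key once, keeps a constant table of the four metric display suffixes, and emits check columns then plain columns in two table-driven passes.
import Mathlib
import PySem

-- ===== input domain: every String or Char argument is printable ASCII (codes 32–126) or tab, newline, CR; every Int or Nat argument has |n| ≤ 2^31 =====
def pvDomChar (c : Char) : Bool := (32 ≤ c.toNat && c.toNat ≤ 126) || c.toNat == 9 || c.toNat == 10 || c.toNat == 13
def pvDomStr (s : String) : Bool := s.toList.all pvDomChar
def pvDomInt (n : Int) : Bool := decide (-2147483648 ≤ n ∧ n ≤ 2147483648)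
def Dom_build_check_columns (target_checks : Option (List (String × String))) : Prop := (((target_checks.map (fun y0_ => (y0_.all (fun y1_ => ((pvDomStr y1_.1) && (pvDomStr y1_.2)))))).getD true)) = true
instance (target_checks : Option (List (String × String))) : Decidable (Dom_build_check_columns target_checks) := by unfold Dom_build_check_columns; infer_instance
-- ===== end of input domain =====

-- B drops A's build-then-stable-sort and per-metric suffix branching: it formats each key once,
-- pairs it with a constant table of the four metric display suffixes, and emits the check columns
-- then the plain columns in two table-driven passes — objective: simpler.

-- ===== PORT A =====
-- str.capitalize() ported by hand (not in PySem): first char uppercased, rest lowercased — exact on ASCII.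
def pvCapitalize (w : List Char) : List Char :=
  match w with
  | [] => []
  | c :: t => PySem.Chars.upperChar c :: PySem.Chars.lower t

-- the tuple A's comprehension builds for one (k, metric) pair
def pvColA (k metric : List Char) : String × String :=
  let name := k ++ '_' :: metric      -- f"{k}_{metric}"
  (String.ofList name,
   String.ofList
     ((PySem.Chars.join " ".toList
        ((PySem.Chars.splitOn name "_".toList).map (fun w =>
          if PySem.Chars.lower w = "ttft".toList then PySem.Chars.upper w else pvCapitalize w)))
      ++ (if PySem.Chars.endswith metric "_check".toList || PySem.Chars.endswith metric "_ratio".toList then []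
          else if PySem.Chars.startswith metric "ttft".toList then " (ms)".toList
          else if PySem.Chars.startswith metric "tput".toList then " (TPS)".toList
          else [])))

def build_check_columns (target_checks : Option (List (String × String))) : List (String × String) :=
  match target_checks with
  | none => []
  | some d =>
    if d = [] then []
    else
      -- 'for k in target_checks': the dict's keys, in insertion order (duplicates collapsed)
      let check_cols :=
        (PySem.List.dedup (d.map Prod.fst)).flatMap (fun k =>
          ["ttft_check", "tput_user_check", "ttft", "tput_user"].map (fun m => pvColA k.toList m.toList))
      PySem.List.sorted check_cols (fun col => !(PySem.Str.endswith col.1 "_check")) false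

-- ===== PORT B =====
-- Source B's _fmt(k): display form of a key alone
def pvFmt (k : List Char) : List Char :=
  PySem.Chars.join " ".toList
    ((PySem.Chars.splitOn k "_".toList).map (fun w =>
      if PySem.Chars.lower w = "ttft".toList then PySem.Chars.upper w else pvCapitalize w))

-- Source B's constant metric tables: (metric name suffix, ready-made display suffix)
def pvCheckMetrics : List (String × String) :=
  [("ttft_check", " TTFT Check"), ("tput_user_check", " Tput User Check")]
def pvPlainMetrics : List (String × String) :=
  [("ttft", " TTFT (ms)"), ("tput_user", " Tput User (TPS)")]

def build_check_columns_alt (target_checks : Option (List (String × String))) : List (String × String) :=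
  match target_checks with
  | none => []
  | some d =>
    if d = [] then []
    else
      let rows := (PySem.List.dedup (d.map Prod.fst)).map (fun k => (k.toList, pvFmt k.toList))
      [pvCheckMetrics, pvPlainMetrics].foldl (fun out metrics =>
        out ++ rows.flatMap (fun r =>
          metrics.map (fun md =>
            (String.ofList (r.1 ++ '_' :: md.1.toList),
             String.ofList (r.2 ++ md.2.toList))))) []

-- ===== PRECONDITION & SPEC =====
def Spec_build_check_columns (target_checks : Option (List (String × String))) (out : List (String × String)) : Prop := out = build_check_columns_alt target_checks
instance (target_checks : Option (List (String × String))) (out : List (String × String)) : Decidable (Spec_build_check_columns target_checks out) := by unfold Spec_build_check_columns; infer_instance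

-- ===== CLAIM (what is proved, stated in full; the proofs are below) =====
def Claim_equal_build_check_columns : Prop := ∀ (target_checks : Option (List (String × String))), Dom_build_check_columns target_checks → Spec_build_check_columns target_checks (build_check_columns target_checks)

-- ===== LEMMAS AND PROOFS =====

-- —— stable sort on a Bool key = stable partition ——

theorem pv_insertBy_split {α : Type} (key : α → Bool) (x : α) (A B : List α)
    (hA : ∀ a ∈ A, key a = false) (hB : ∀ b ∈ B, key b = true) :
    PySem.List.insertBy (fun a b => decide (key a < key b)) x (A ++ B) =
      if key x then A ++ B ++ [x] else A ++ x :: B := by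
  induction A with
  | nil =>
    simp only [List.nil_append]
    induction B with
    | nil => simp [PySem.List.insertBy]
    | cons b bs ih =>
      have hb : key b = true := hB b (by simp)
      have ih' := ih (fun y hy => hB y (by simp [hy]))
      cases hx : key x with
      | false => simp [PySem.List.insertBy, hb, hx]
      | true => simp [PySem.List.insertBy, hb, hx, ih']
  | cons a as ih =>
    have ha : key a = false := hA a (by simp)
    have ih' := ih (fun y hy => hA y (by simp [hy]))
    cases hx : key x with
    | false => simp [PySem.List.insertBy, ha, hx, ih']
    | true => simp [PySem.List.insertBy, ha, hx, ih']

theorem pv_foldl_insertBy_split {α : Type} (key : α → Bool) (xs : List α) (A B : List α)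
    (hA : ∀ a ∈ A, key a = false) (hB : ∀ b ∈ B, key b = true) :
    xs.foldl (fun acc x => PySem.List.insertBy (fun a b => decide (key a < key b)) x acc) (A ++ B) =
      (A ++ xs.filter (fun x => !key x)) ++ (B ++ xs.filter key) := by
  induction xs generalizing A B with
  | nil => simp
  | cons x t ih =>
    simp only [List.foldl_cons, pv_insertBy_split key x A B hA hB]
    cases hx : key x with
    | false =>
      have hA' : ∀ a ∈ A ++ [x], key a = false := by
        intro a ha
        rcases List.mem_append.1 ha with h | h
        · exact hA a h
        · simp only [List.mem_singleton] at h; rw [h]; exact hx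
      have := ih (A ++ [x]) B hA' hB
      simpa [List.filter_cons, hx] using this
    | true =>
      have hB' : ∀ b ∈ B ++ [x], key b = true := by
        intro b hb
        rcases List.mem_append.1 hb with h | h
        · exact hB b h
        · simp only [List.mem_singleton] at h; rw [h]; exact hx
      have := ih A (B ++ [x]) hA hB'
      simpa [List.filter_cons, hx] using this

theorem pv_sorted_bool_partition {α : Type} (xs : List α) (key : α → Bool) :
    PySem.List.sorted xs key false = xs.filter (fun x => !key x) ++ xs.filter key := by
  have := pv_foldl_insertBy_split key xs [] [] (by simp) (by simp)
  simpa [PySem.List.sorted_eq_foldl_insertBy] using this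

-- —— "_check"-suffix key of A's columns ——

theorem pv_no_check_suffix (k pre : List Char) (c : Char) (hc : c ≠ 'k') :
    PySem.Chars.endswith (k ++ (pre ++ [c])) "_check".toList = false := by
  rw [Bool.eq_false_iff]
  intro h
  have hsuf := (PySem.Chars.endswith_iff _ _).1 h
  rw [← List.reverse_prefix] at hsuf
  rw [show ("_check".toList.reverse) = ['k','c','e','h','c','_'] from rfl] at hsuf
  rw [List.reverse_append, List.reverse_append] at hsuf
  simp only [List.reverse_cons, List.reverse_nil, List.nil_append, List.cons_append] at hsuf
  exact hc (List.cons_prefix_cons.1 hsuf).1.symm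

theorem pv_check_suffix (k m : List Char) (hm : "_check".toList <:+ m) :
    PySem.Chars.endswith (k ++ '_' :: m) "_check".toList = true :=
  (PySem.Chars.endswith_iff _ _).2
    (hm.trans ((List.suffix_cons '_' m).trans (List.suffix_append k ('_' :: m))))

def pvKey : String × String → Bool := fun col => !(PySem.Str.endswith col.1 "_check")

theorem pv_key_check (k : String) (m : List Char) (hm : "_check".toList <:+ m) :
    pvKey (pvColA k.toList m) = false := by
  show (!(PySem.Str.endswith (String.ofList (k.toList ++ '_' :: m)) "_check")) = false
  rw [PySem.Str.endswith_eq, String.toList_ofList, pv_check_suffix k.toList m hm]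
  rfl

theorem pv_key_plain (k : String) (m pre : List Char) (c : Char)
    (hm : m = pre ++ [c]) (hc : c ≠ 'k') :
    pvKey (pvColA k.toList m) = true := by
  show (!(PySem.Str.endswith (String.ofList (k.toList ++ '_' :: m)) "_check")) = true
  rw [PySem.Str.endswith_eq, String.toList_ofList]
  rw [show (k.toList ++ '_' :: m) = k.toList ++ (('_' :: pre) ++ [c]) by simp [hm]]
  rw [pv_no_check_suffix k.toList ('_' :: pre) c hc]
  rfl

-- —— splitOn on '_' distributes over the "_"-concatenation (proof-side characterization) ——

def pvSplitU (cur : List Char) : List Char → List (List Char)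
  | [] => [cur.reverse]
  | c :: rest => if c = '_' then cur.reverse :: pvSplitU [] rest else pvSplitU (c :: cur) rest

theorem pv_go_spec (fuel : Nat) (l cur : List Char) (acc : List (List Char))
    (h : l.length < fuel) :
    PySem.Chars.splitOn.go ['_'] fuel l cur acc = acc.reverse ++ pvSplitU cur l := by
  induction fuel generalizing l cur acc with
  | zero => omega
  | succ n ih =>
    cases l with
    | nil => simp [PySem.Chars.splitOn.go, pvSplitU]
    | cons c rest =>
      by_cases hc : c = '_'
      · subst hc
        have : List.isPrefixOf ['_'] ('_' :: rest) = true := by simp [List.isPrefixOf]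
        rw [PySem.Chars.splitOn.go]
        simp only [this, if_true, List.length_cons, List.length_nil, List.drop_succ_cons,
          List.drop_zero]
        rw [ih rest [] (cur.reverse :: acc) (by simp at h; omega)]
        simp [pvSplitU]
      · have : List.isPrefixOf ['_'] (c :: rest) = false := by
          simp only [List.isPrefixOf, Bool.and_true, beq_iff_eq, Bool.eq_false_iff, ne_eq]
          exact fun h => hc h.symm
        rw [PySem.Chars.splitOn.go]
        simp only [this]
        rw [ih rest (c :: cur) acc (by simp at h; omega)]
        simp [pvSplitU, hc]

theorem pv_splitOn_underscore (l : List Char) :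
    PySem.Chars.splitOn l "_".toList = pvSplitU [] l := by
  show PySem.Chars.splitOn.go ['_'] (l.length + 1) l [] [] = _
  rw [pv_go_spec l.length.succ l [] [] (by omega)]
  simp

theorem pvSplitU_ne_nil (cur l : List Char) : pvSplitU cur l ≠ [] := by
  induction l generalizing cur with
  | nil => simp [pvSplitU]
  | cons c rest ih =>
    by_cases hc : c = '_' <;> simp [pvSplitU, hc, ih]

theorem pvSplitU_append (k m cur : List Char) :
    pvSplitU cur (k ++ '_' :: m) = pvSplitU cur k ++ pvSplitU [] m := by
  induction k generalizing cur with
  | nil => simp [pvSplitU]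
  | cons c rest ih =>
    by_cases hc : c = '_' <;> simp [pvSplitU, hc, ih]

-- —— " ".join distributes over appending two nonempty word lists ——

theorem pv_intersperse_append {α : Type} (sep : α) (A B : List α) (hA : A ≠ []) (hB : B ≠ []) :
    List.intersperse sep (A ++ B) = List.intersperse sep A ++ sep :: List.intersperse sep B := by
  induction A with
  | nil => exact absurd rfl hA
  | cons a t ih =>
    cases t with
    | nil =>
      cases B with
      | nil => exact absurd rfl hB
      | cons b bs => simp [List.intersperse]
    | cons a2 t2 =>
      have := ih (by simp)
      simp only [List.cons_append, List.intersperse] at this ⊢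
      rw [this]

theorem pv_join_append (sep : List Char) (A B : List (List Char)) (hA : A ≠ []) (hB : B ≠ []) :
    PySem.Chars.join sep (A ++ B) =
      PySem.Chars.join sep A ++ sep ++ PySem.Chars.join sep B := by
  show sep.intercalate (A ++ B) = sep.intercalate A ++ sep ++ sep.intercalate B
  simp only [List.intercalate, pv_intersperse_append sep A B hA hB]
  simp

-- —— A's column for each of the four fixed metrics = B's (formatted key) ++ (constant suffix) ——

def pvRule : List Char → List Char := fun w =>
  if PySem.Chars.lower w = "ttft".toList then PySem.Chars.upper w else pvCapitalize w

theorem pv_colA_fixed (k m disp : List Char)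
    (hmd : PySem.Chars.join " ".toList ((pvSplitU [] m).map pvRule)
             ++ (if PySem.Chars.endswith m "_check".toList || PySem.Chars.endswith m "_ratio".toList then []
                 else if PySem.Chars.startswith m "ttft".toList then " (ms)".toList
                 else if PySem.Chars.startswith m "tput".toList then " (TPS)".toList
                 else []) = disp.tail)
    (hd : disp.head? = some ' ') :
    pvColA k m =
      (String.ofList (k ++ '_' :: m), String.ofList (pvFmt k ++ disp)) := by
  unfold pvColA pvFmt
  simp only []
  congr 1
  congr 1
  rw [pv_splitOn_underscore, pv_splitOn_underscore, pvSplitU_append, List.map_append]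
  rw [pv_join_append " ".toList _ _
        (by simp [pvSplitU_ne_nil]) (by simp [pvSplitU_ne_nil])]
  show (PySem.Chars.join " ".toList ((pvSplitU [] k).map pvRule) ++ " ".toList
          ++ PySem.Chars.join " ".toList ((pvSplitU [] m).map pvRule)) ++ _ =
       PySem.Chars.join " ".toList ((pvSplitU [] k).map pvRule) ++ disp
  rw [List.append_assoc, List.append_assoc, hmd]
  congr 1
  cases hdl : disp with
  | nil => rw [hdl] at hd; simp at hd
  | cons c t =>
    rw [hdl] at hd
    simp only [List.head?_cons, Option.some.injEq] at hd
    simp [hd]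

-- —— assembling both sides per key ——

theorem pv_colsA_key (k : String) :
    (["ttft_check", "tput_user_check", "ttft", "tput_user"].map
        (fun m => pvColA k.toList m.toList)).filter (fun c => !pvKey c) =
      pvCheckMetrics.map (fun md =>
        (String.ofList (k.toList ++ '_' :: md.1.toList),
         String.ofList (pvFmt k.toList ++ md.2.toList))) := by
  have h1 := pv_key_check k ['t','t','f','t','_','c','h','e','c','k'] (by decide)
  have h2 := pv_key_check k ['t','p','u','t','_','u','s','e','r','_','c','h','e','c','k'] (by decide)
  have h3 := pv_key_plain k ['t','t','f','t'] ['t','t','f'] 't' rfl (by decide)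
  have h4 := pv_key_plain k ['t','p','u','t','_','u','s','e','r'] ['t','p','u','t','_','u','s','e'] 'r' rfl (by decide)
  have e1 := pv_colA_fixed k.toList ['t','t','f','t','_','c','h','e','c','k']
    [' ','T','T','F','T',' ','C','h','e','c','k'] (by decide) (by decide)
  have e2 := pv_colA_fixed k.toList ['t','p','u','t','_','u','s','e','r','_','c','h','e','c','k']
    [' ','T','p','u','t',' ','U','s','e','r',' ','C','h','e','c','k'] (by decide) (by decide)
  rw [e1] at h1; rw [e2] at h2
  simp at h1 h2
  simp [e1, e2, h1, h2, h3, h4, pvCheckMetrics]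

theorem pv_colsA_key' (k : String) :
    (["ttft_check", "tput_user_check", "ttft", "tput_user"].map
        (fun m => pvColA k.toList m.toList)).filter pvKey =
      pvPlainMetrics.map (fun md =>
        (String.ofList (k.toList ++ '_' :: md.1.toList),
         String.ofList (pvFmt k.toList ++ md.2.toList))) := by
  have h1 := pv_key_check k ['t','t','f','t','_','c','h','e','c','k'] (by decide)
  have h2 := pv_key_check k ['t','p','u','t','_','u','s','e','r','_','c','h','e','c','k'] (by decide)
  have h3 := pv_key_plain k ['t','t','f','t'] ['t','t','f'] 't' rfl (by decide)
  have h4 := pv_key_plain k ['t','p','u','t','_','u','s','e','r'] ['t','p','u','t','_','u','s','e'] 'r' rfl (by decide)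
  have e3 := pv_colA_fixed k.toList ['t','t','f','t']
    [' ','T','T','F','T',' ','(','m','s',')'] (by decide) (by decide)
  have e4 := pv_colA_fixed k.toList ['t','p','u','t','_','u','s','e','r']
    [' ','T','p','u','t',' ','U','s','e','r',' ','(','T','P','S',')'] (by decide) (by decide)
  rw [e3] at h3; rw [e4] at h4
  simp at h3 h4
  simp [e3, e4, h1, h2, h3, h4, pvPlainMetrics]

-- ===== VERDICT (by name: the statement is the Claim_ definition above) =====
theorem build_check_columns_spec : Claim_equal_build_check_columns := by
  unfold Claim_equal_build_check_columns
  intro tc _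
  unfold Spec_build_check_columns build_check_columns build_check_columns_alt
  cases tc with
  | none => rfl
  | some d =>
    by_cases hd : d = []
    · simp [hd]
    · simp only [hd, if_false]
      rw [show (fun col : String × String => !(PySem.Str.endswith col.1 "_check")) = pvKey from rfl]
      rw [pv_sorted_bool_partition, List.filter_flatMap, List.filter_flatMap]
      simp only [List.foldl_cons, List.foldl_nil, List.nil_append, List.flatMap_map]
      congr 1
      · exact List.flatMap_congr (fun k _ => pv_colsA_key k)
      · exact List.flatMap_congr (fun k _ => pv_colsA_key' k)
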